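-- pv_equiv track=rewrite | github.com/NVlabs/ScheduleStream | src/schedulestream/language/generator.py | diagonal_product
-- ===== SOURCE A (Python) =====
-- from itertools import chain, count, islice
-- from typing import Any, Callable, Iterable, Iterator, List, Optional, Sized, Tuple
--
-- def diagonal_product(iterables: List[Iterable[Any]]) -> Iterator[Tuple[Any]]:
--     iterators = [iter(iterable) for iterable in iterables]
--     sequences = [[] for _ in range(len(iterators))]
--
--     def fn(remaining: int, index: int = 0) -> Iterator[Tuple[Any]]:
--         if index == len(sequences):
--             yield tuple()
--             return
--         max_remaining = sum(map(len, sequences[index + 1 :]))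
--         nums = range(max(0, remaining - max_remaining), min(len(sequences[index]), remaining + 1))
--         for n in nums:
--             item = sequences[index][n]
--             for combo in fn(remaining - n, index + 1):
--                 yield (item,) + combo
--
--     for diagonal in count():
--         for i, iterator in enumerate(iterators):
--             try:
--                 sequences[i].append(next(iterator))
--             except StopIteration:
--                 pass
--         exhausted = True
--         for combo in fn(diagonal):
--             yield combo
--             exhausted = False
--         if exhausted:
--             break
-- ===== SOURCE B (Python) =====
-- from itertools import product
--
--
-- def diagonal_product(iterables):
--     sequences = [list(iterable) for iterable in iterables]
--     combos = list(product(*(range(len(s)) for s in sequences)))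
--     top = sum(len(s) for s in sequences) - len(sequences)
--     for diagonal in range(top + 1):
--         for idx in combos:
--             if sum(idx) == diagonal:
--                 yield tuple(s[n] for s, n in zip(sequences, idx))
-- ===== Notes on version B (the rewrite author's own statement) =====
-- stated objective: simpler
-- what changed: Replaced A's incrementally-grown per-iterator sequences, pruned recursive generator and emptiness-based break with a flat formulation: materialise the full cartesian product of index ranges once, compute the last diagonal in closed form, and emit the product filtered by index-sum for each diagonal.
-- outside the precondition, e.g. on diagonal_product([]): A does not finish within the time limit, B returns [()]
import Mathlib
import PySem

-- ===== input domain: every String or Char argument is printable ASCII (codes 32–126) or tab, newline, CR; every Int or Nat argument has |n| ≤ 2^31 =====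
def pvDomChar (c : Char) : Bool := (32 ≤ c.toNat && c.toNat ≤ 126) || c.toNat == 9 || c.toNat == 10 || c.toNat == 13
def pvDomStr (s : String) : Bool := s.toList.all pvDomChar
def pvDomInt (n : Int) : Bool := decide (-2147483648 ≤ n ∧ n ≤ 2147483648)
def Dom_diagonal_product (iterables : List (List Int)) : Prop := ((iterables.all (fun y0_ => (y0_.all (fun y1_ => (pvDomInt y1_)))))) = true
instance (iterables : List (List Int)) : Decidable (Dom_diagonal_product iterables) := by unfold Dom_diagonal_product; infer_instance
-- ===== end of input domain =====

-- B replaces A's incrementally grown sequences, pruned recursive generator and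
-- emptiness-based break by one materialised index product filtered per diagonal
-- up to a closed-form last diagonal (objective: simpler).  Equivalence is about
-- the list of yielded tuples of the two generators.

-- ===== PORT A =====
-- Python's inner generator fn; index only ever reaches len(sequences), the ≤ in the
-- guard (Python tests ==) is the totality guard for unreachable index > len.
def pvFnA (sequences : List (List Int)) (remaining : Int) (index : Nat) : List (List Int) :=
  if _h : sequences.length ≤ index then [[]]
  else
    let max_remaining : Int := ((sequences.drop (index + 1)).map (fun s => (s.length : Int))).sum
    let seqi := sequences.getD index []
    let nums := PySem.List.pyRange (max 0 (remaining - max_remaining)) (min (seqi.length : Int) (remaining + 1)) 1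
    nums.flatMap (fun n =>
      (pvFnA sequences (remaining - n) (index + 1)).map
        (fun combo => PySem.List.pyGetD seqi n 0 :: combo))
termination_by sequences.length - index
decreasing_by omega

-- Python's `for diagonal in count(): …` loop; on every input admitted by Pre_ the
-- Python loop breaks, and the fuel (total length + 2) is enough for that break to
-- fire first, so the fuel is only a totality guard.
def pvLoopA (fuel : Nat) (diagonal : Int) (iterators sequences : List (List Int)) : List (List Int) :=
  match fuel with
  | 0 => []
  | fuel' + 1 =>
    let stepped := (iterators.zip sequences).map (fun p =>
      match p.1 with
      | [] => ([], p.2)                        -- StopIteration: pass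
      | x :: rest => (rest, p.2 ++ [x]))       -- sequences[i].append(next(iterator))
    let iterators' := stepped.map Prod.fst
    let sequences' := stepped.map Prod.snd
    let combos := pvFnA sequences' diagonal 0
    if combos.isEmpty then [] else combos ++ pvLoopA fuel' (diagonal + 1) iterators' sequences'

def diagonal_product (iterables : List (List Int)) : List (List Int) :=
  pvLoopA ((iterables.map List.length).sum + 2) 0 iterables (iterables.map (fun _ => []))

-- ===== PORT B =====
-- itertools.product(*(range(len(s)) for s in sequences)), in its lexicographic order
def pvProdIdx : List (List Int) → List (List Int)
  | [] => [[]]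
  | s :: rest => (PySem.List.pyRange 0 (s.length : Int) 1).flatMap
      (fun n => (pvProdIdx rest).map (fun t => n :: t))

-- tuple(s[n] for s, n in zip(sequences, idx))
def pvZipVals (sequences : List (List Int)) (idx : List Int) : List Int :=
  (sequences.zip idx).map (fun p => PySem.List.pyGetD p.1 p.2 0)

def diagonal_product_alt (iterables : List (List Int)) : List (List Int) :=
  let sequences := iterables
  let combos := pvProdIdx sequences
  let top : Int := ((sequences.map (fun s => (s.length : Int))).sum) - sequences.length
  (PySem.List.pyRange 0 (top + 1) 1).flatMap (fun diagonal =>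
    (combos.filter (fun idx => idx.sum == diagonal)).map (fun idx => pvZipVals sequences idx))

-- ===== PRECONDITION & SPEC =====
-- Pre_ excludes only iterables = [], on which Python's A is an infinite generator
-- (it yields the empty tuple on every diagonal and never breaks).
def Pre_diagonal_product (iterables : List (List Int)) : Prop := iterables ≠ []
instance (iterables : List (List Int)) : Decidable (Pre_diagonal_product iterables) := by
  unfold Pre_diagonal_product; infer_instance

def pvWitness_diagonal_product : List (List Int) := [[1, 2], [3]]

def Spec_diagonal_product (iterables : List (List Int)) (out : List (List Int)) : Prop := out = diagonal_product_alt iterables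
instance (iterables : List (List Int)) (out : List (List Int)) : Decidable (Spec_diagonal_product iterables out) := by unfold Spec_diagonal_product; infer_instance

-- ===== CLAIM (what is proved, stated in full; the proofs are below) =====
def Claim_equal_diagonal_product : Prop := ∀ (iterables : List (List Int)), Dom_diagonal_product iterables → Pre_diagonal_product iterables → Spec_diagonal_product iterables (diagonal_product iterables)

-- ===== LEMMAS AND PROOFS =====

def pvSumLens (xs : List (List Int)) : Int := ((xs.map (fun s => (s.length : Int))).sum)

def pvDiag (xs : List (List Int)) (d : Int) : List (List Int) :=
  ((pvProdIdx xs).filter (fun t => t.sum == d)).map (fun t => pvZipVals xs t)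

lemma pvProdIdx_sum_bounds {xs : List (List Int)} {t : List Int} (h : t ∈ pvProdIdx xs) :
    0 ≤ t.sum ∧ t.sum ≤ pvSumLens xs - xs.length := by
  induction xs generalizing t with
  | nil => simp [pvProdIdx] at h; simp [h, pvSumLens]
  | cons s rest ih =>
    simp only [pvProdIdx, List.mem_flatMap, List.mem_map] at h
    obtain ⟨n, hn, t', ht', rfl⟩ := h
    rw [PySem.List.mem_pyRange_one] at hn
    have := ih ht'
    simp only [List.sum_cons, pvSumLens, List.map_cons, List.length_cons] at *
    push_cast
    omega

lemma pvDiag_eq_nil {xs : List (List Int)} {d : Int}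
    (h : d < 0 ∨ pvSumLens xs - xs.length < d) : pvDiag xs d = [] := by
  unfold pvDiag
  rw [List.filter_eq_nil_iff.mpr, List.map_nil]
  intro t ht
  have := pvProdIdx_sum_bounds ht
  simp only [beq_iff_eq]
  omega

lemma pvProdIdx_nil_of_mem_nil {xs : List (List Int)} (h : [] ∈ xs) : pvProdIdx xs = [] := by
  induction xs with
  | nil => simp at h
  | cons s rest ih =>
    rcases List.mem_cons.mp h with rfl | hm
    · simp [pvProdIdx, PySem.List.pyRange_one_eq_nil]
    · simp [pvProdIdx, ih hm]

lemma pvSumLens_ge_length {xs : List (List Int)} (h : ∀ x ∈ xs, x ≠ []) :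
    (xs.length : Int) ≤ pvSumLens xs := by
  induction xs with
  | nil => simp [pvSumLens]
  | cons s rest ih =>
    have hs : s ≠ [] := h s (by simp)
    have hs' : 1 ≤ s.length := List.length_pos_iff.mpr hs
    have := ih (fun x hx => h x (by simp [hx]))
    simp only [pvSumLens, List.map_cons, List.sum_cons, List.length_cons] at *
    push_cast
    omega

lemma pvStep_eq (xs : List (List Int)) (d : Nat) :
    ((xs.map (List.drop d)).zip (xs.map (List.take d))).map (fun p =>
        match p.1 with
        | [] => ([], p.2)
        | x :: rest => (rest, p.2 ++ [x]))
      = xs.map (fun x => (x.drop (d + 1), x.take (d + 1))) := by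
  rw [List.zip_map', List.map_map]
  apply List.map_congr_left
  intro x _
  simp only [Function.comp]
  cases hd : x.drop d with
  | nil =>
    have hlen : x.length ≤ d := List.drop_eq_nil_iff.mp hd
    simp [List.drop_eq_nil_iff.mpr (by omega : x.length ≤ d + 1),
      List.take_of_length_le hlen, List.take_of_length_le (by omega : x.length ≤ d + 1)]
  | cons y t =>
    have hdrop : x.drop (d + 1) = t := by
      have : x.drop (d + 1) = (x.drop d).drop 1 := by
        rw [List.drop_drop]
      rw [this, hd]; rfl
    have hget : x[d]? = some y := by
      have h0 : (x.drop d)[0]? = x[d + 0]? := List.getElem?_drop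
      simpa [hd] using h0.symm
    have htake : x.take (d + 1) = x.take d ++ [y] := by
      rw [List.take_add_one, hget]; rfl
    simp [hdrop, htake]

lemma pvFlatMap_pyRange_sub (a b c d : Int) (g : Int → List (List Int))
    (hca : a ≤ c) (hdb : d ≤ b)
    (h : ∀ n, a ≤ n → n < b → (n < c ∨ d ≤ n) → g n = []) :
    (PySem.List.pyRange a b 1).flatMap g = (PySem.List.pyRange c d 1).flatMap g := by
  by_cases hcd : c ≤ d
  · rw [PySem.List.pyRange_one_append a c b hca (le_trans hcd hdb),
      PySem.List.pyRange_one_append c d b hcd hdb, List.flatMap_append, List.flatMap_append]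
    have h1 : (PySem.List.pyRange a c 1).flatMap g = [] := by
      rw [List.flatMap_eq_nil_iff]
      intro n hn
      rw [PySem.List.mem_pyRange_one] at hn
      exact h n hn.1 (by omega) (Or.inl hn.2)
    have h2 : (PySem.List.pyRange d b 1).flatMap g = [] := by
      rw [List.flatMap_eq_nil_iff]
      intro n hn
      rw [PySem.List.mem_pyRange_one] at hn
      exact h n (by omega) hn.2 (Or.inr hn.1)
    rw [h1, h2, List.nil_append, List.append_nil]
  · rw [PySem.List.pyRange_one_eq_nil (by omega : d ≤ c), List.flatMap_nil,
      List.flatMap_eq_nil_iff]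
    intro n hn
    rw [PySem.List.mem_pyRange_one] at hn
    by_cases hnc : n < c
    · exact h n hn.1 hn.2 (Or.inl hnc)
    · exact h n hn.1 hn.2 (Or.inr (by omega))

lemma pvDiag_cons (s : List Int) (rest : List (List Int)) (r : Int) :
    pvDiag (s :: rest) r =
      (PySem.List.pyRange 0 (s.length : Int) 1).flatMap
        (fun n => (pvDiag rest (r - n)).map
          (fun combo => PySem.List.pyGetD s n 0 :: combo)) := by
  unfold pvDiag
  rw [pvProdIdx]
  rw [List.filter_flatMap, List.map_flatMap]
  congr 1
  funext n
  rw [List.filter_map, List.map_map, List.map_map]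
  have hfilter : (pvProdIdx rest).filter ((fun t => t.sum == r) ∘ (fun t => n :: t))
      = (pvProdIdx rest).filter (fun t => t.sum == r - n) := by
    apply List.filter_congr
    intro t _
    simp only [Function.comp, List.sum_cons]
    rw [Bool.eq_iff_iff, beq_iff_eq, beq_iff_eq]
    omega
  rw [hfilter]
  apply List.map_congr_left
  intro t _
  simp [pvZipVals]

lemma pvFnA_eq (xs : List (List Int)) :
    ∀ (k index : Nat) (r : Int), xs.length - index = k → index < xs.length →
      pvFnA xs r index = pvDiag (xs.drop index) r := by
  intro k
  induction k with
  | zero => intro index r hk hlt; omega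
  | succ k ih =>
    intro index r hk hlt
    have hget : xs.getD index [] = xs[index] := List.getD_eq_getElem xs [] hlt
    have hdrop : xs.drop index = xs[index] :: xs.drop (index + 1) :=
      List.drop_eq_getElem_cons hlt
    rw [pvFnA, dif_neg (by omega), hget, hdrop, pvDiag_cons]
    set M : Int := ((xs.drop (index + 1)).map (fun s => (s.length : Int))).sum with hM
    have hMtail : M = pvSumLens (xs.drop (index + 1)) := rfl
    set g : Int → List (List Int) := fun n =>
      (pvDiag (xs.drop (index + 1)) (r - n)).map
        (fun combo => PySem.List.pyGetD xs[index] n 0 :: combo) with hg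
    have hbody : ∀ n ∈ PySem.List.pyRange (max 0 (r - M)) (min ((xs[index].length : Int)) (r + 1)) 1,
        pvFnA xs (r - n) (index + 1) = pvDiag (xs.drop (index + 1)) (r - n) := by
      intro n hn
      by_cases hlt' : index + 1 < xs.length
      · exact ih (index + 1) (r - n) (by omega) hlt'
      · have hdrop2 : xs.drop (index + 1) = [] := List.drop_eq_nil_of_le (by omega)
        have hM0 : M = 0 := by rw [hM, hdrop2]; simp
        rw [PySem.List.mem_pyRange_one] at hn
        have hnr : n = r := by omega
        rw [pvFnA, dif_pos (by omega), hdrop2, hnr]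
        simp [pvDiag, pvProdIdx, pvZipVals]
    have hcong : (PySem.List.pyRange (max 0 (r - M)) (min ((xs[index].length : Int)) (r + 1)) 1).flatMap
          (fun n => (pvFnA xs (r - n) (index + 1)).map
            (fun combo => PySem.List.pyGetD xs[index] n 0 :: combo))
        = (PySem.List.pyRange (max 0 (r - M)) (min ((xs[index].length : Int)) (r + 1)) 1).flatMap g := by
      rw [List.flatMap_def, List.flatMap_def]
      congr 1
      apply List.map_congr_left
      intro n hn
      rw [hbody n hn]
    rw [hcong]
    have hempty : ∀ n, 0 ≤ n → n < (xs[index].length : Int) →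
        (n < max 0 (r - M) ∨ min ((xs[index].length : Int)) (r + 1) ≤ n) → g n = [] := by
      intro n h0 hlen hor
      have htl : (0 : Int) ≤ ((xs.drop (index + 1)).length : Int) := by positivity
      have hdg : pvDiag (xs.drop (index + 1)) (r - n) = [] := by
        apply pvDiag_eq_nil
        rw [← hMtail]
        omega
      rw [hg]
      simp [hdg]
    have hext := pvFlatMap_pyRange_sub 0 ((xs[index].length : Int))
      (max 0 (r - M)) (min ((xs[index].length : Int)) (r + 1)) g
      (by omega) (by omega) hempty
    rw [← hext]

lemma pvDiag_take (d : Nat) :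
    ∀ (xs : List (List Int)) (r : Int), 0 ≤ r → r ≤ (d : Int) →
      pvDiag (xs.map (List.take (d + 1))) r = pvDiag xs r := by
  intro xs
  induction xs with
  | nil => intro r _ _; rfl
  | cons s rest ih =>
    intro r hr0 hrd
    rw [List.map_cons, pvDiag_cons, pvDiag_cons]
    have hlen : ((s.take (d + 1)).length : Int) = min ((d : Int) + 1) (s.length : Int) := by
      rw [List.length_take]; push_cast; omega
    -- shrink the full range [0, |s|) to [0, min (d+1) |s|)
    have hext := pvFlatMap_pyRange_sub 0 (s.length : Int) 0 (min ((d : Int) + 1) (s.length : Int))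
      (fun n => (pvDiag rest (r - n)).map (fun combo => PySem.List.pyGetD s n 0 :: combo))
      (by omega) (by omega)
      (by
        intro n h0 hn hor
        have : pvDiag rest (r - n) = [] := pvDiag_eq_nil (Or.inl (by omega))
        simp [this])
    rw [hext, hlen]
    rw [List.flatMap_def, List.flatMap_def]
    congr 1
    apply List.map_congr_left
    intro n hn
    rw [PySem.List.mem_pyRange_one] at hn
    have hnd : 0 ≤ n ∧ n < (d : Int) + 1 ∧ n < (s.length : Int) := by omega
    have hgets : PySem.List.pyGetD (s.take (d + 1)) n 0 = PySem.List.pyGetD s n 0 := by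
      rw [PySem.List.pyGetD_eq_getElem _ _ (by omega) (by rw [hlen]; omega),
        PySem.List.pyGetD_eq_getElem _ _ (by omega) (by omega)]
      exact List.getElem_take
    rw [hgets]
    by_cases hrn : 0 ≤ r - n
    · rw [ih (r - n) hrn (by omega)]
    · rw [pvDiag_eq_nil (Or.inl (by omega)), pvDiag_eq_nil (Or.inl (by omega))]

lemma pvProdIdx_exists_sum :
    ∀ (xs : List (List Int)) (d : Int), (∀ x ∈ xs, x ≠ []) → 0 ≤ d →
      d ≤ pvSumLens xs - xs.length → ∃ t ∈ pvProdIdx xs, t.sum = d := by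
  intro xs
  induction xs with
  | nil =>
    intro d _ h0 h1
    have : d = 0 := by simp [pvSumLens] at h1; omega
    exact ⟨[], by simp [pvProdIdx], by simp [this]⟩
  | cons s rest ih =>
    intro d hne h0 h1
    have hs : s ≠ [] := hne s (by simp)
    have hs' : 1 ≤ s.length := List.length_pos_iff.mpr hs
    have hrest : (rest.length : Int) ≤ pvSumLens rest :=
      pvSumLens_ge_length (fun x hx => hne x (by simp [hx]))
    have hsum : pvSumLens (s :: rest) = (s.length : Int) + pvSumLens rest := by
      simp [pvSumLens]
    set n : Int := min d ((s.length : Int) - 1) with hn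
    have hn0 : 0 ≤ n := by omega
    have hnlt : n < (s.length : Int) := by omega
    obtain ⟨t, ht, hts⟩ := ih (d - n)
      (fun x hx => hne x (by simp [hx]))
      (by omega)
      (by simp only [List.length_cons] at h1; push_cast at h1 ⊢; omega)
    refine ⟨n :: t, ?_, by simp [hts]⟩
    simp only [pvProdIdx, List.mem_flatMap]
    exact ⟨n, PySem.List.mem_pyRange_one.mpr ⟨hn0, hnlt⟩, List.mem_map.mpr ⟨t, ht, rfl⟩⟩

lemma pvDiag_ne_nil {xs : List (List Int)} (h : ∀ x ∈ xs, x ≠ []) {d : Int}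
    (h0 : 0 ≤ d) (h1 : d ≤ pvSumLens xs - xs.length) : pvDiag xs d ≠ [] := by
  obtain ⟨t, ht, hts⟩ := pvProdIdx_exists_sum xs d h h0 h1
  unfold pvDiag
  intro hcon
  rw [List.map_eq_nil_iff, List.filter_eq_nil_iff] at hcon
  exact hcon t ht (by simp [hts])

lemma pvSumLens_cast (xs : List (List Int)) : pvSumLens xs = ((xs.map List.length).sum : Int) := by
  induction xs with
  | nil => rfl
  | cons s rest ih => simp [pvSumLens] at ih ⊢; omega

lemma pvLoopA_eq (xs : List (List Int)) (hne : xs ≠ []) (h : ∀ x ∈ xs, x ≠ []) :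
    ∀ (fuel : Nat) (d : Nat), (pvSumLens xs - xs.length + 1 - d).toNat < fuel →
      (d : Int) ≤ pvSumLens xs - xs.length + 1 →
      pvLoopA fuel (d : Int) (xs.map (List.drop d)) (xs.map (List.take d))
        = (PySem.List.pyRange (d : Int) (pvSumLens xs - xs.length + 1) 1).flatMap (pvDiag xs) := by
  intro fuel
  induction fuel with
  | zero => intro d hf _; omega
  | succ fuel ih =>
    intro d hf hd
    rw [pvLoopA]
    simp only [pvStep_eq xs d, List.map_map]
    have hcomp2 : (Prod.snd ∘ fun x : List Int => (List.drop (d + 1) x, List.take (d + 1) x)) = List.take (d + 1) := rfl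
    have hcomp1 : (Prod.fst ∘ fun x : List Int => (List.drop (d + 1) x, List.take (d + 1) x)) = List.drop (d + 1) := rfl
    rw [hcomp1, hcomp2]
    have hlenmap : 0 < (xs.map (List.take (d + 1))).length := by
      simp [List.length_pos_iff, hne]
    have hcombos : pvFnA (xs.map (List.take (d + 1))) (↑d) 0 = pvDiag xs (↑d) := by
      rw [pvFnA_eq (xs.map (List.take (d + 1))) (xs.map (List.take (d + 1))).length 0 (↑d) rfl hlenmap,
        List.drop_zero, pvDiag_take d xs (↑d) (by positivity) le_rfl]
    rw [hcombos]
    by_cases hdS : (d : Int) ≤ pvSumLens xs - xs.length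
    · have hnz : pvDiag xs (↑d) ≠ [] := pvDiag_ne_nil h (by positivity) hdS
      rw [if_neg (by simpa [List.isEmpty_iff] using hnz)]
      have hrec : pvLoopA fuel ((d : Int) + 1) (xs.map (List.drop (d + 1))) (xs.map (List.take (d + 1)))
          = (PySem.List.pyRange ((d : Int) + 1) (pvSumLens xs - xs.length + 1) 1).flatMap (pvDiag xs) := by
        have hfuel : (pvSumLens xs - ↑xs.length + 1 - ↑(d + 1)).toNat < fuel := by push_cast; omega
        have := ih (d + 1) hfuel (by push_cast; omega)
        push_cast at this
        exact this
      rw [hrec, PySem.List.pyRange_one_cons (by omega : (d:Int) < pvSumLens xs - ↑xs.length + 1), List.flatMap_cons]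
    · have hz : pvDiag xs (↑d) = [] := pvDiag_eq_nil (Or.inr (by omega))
      rw [hz, if_pos (by simp)]
      rw [PySem.List.pyRange_one_eq_nil (by omega), List.flatMap_nil]

lemma pvLoopA_break_first (xs : List (List Int)) (hne : xs ≠ []) (hmem : [] ∈ xs) (f : Nat) :
    pvLoopA (f + 1) ((0 : Nat) : Int) (xs.map (List.drop (0 : Nat))) (xs.map (List.take (0 : Nat))) = [] := by
  rw [pvLoopA]
  simp only [pvStep_eq xs 0, List.map_map]
  have hcomp2 : (Prod.snd ∘ fun x : List Int => (List.drop (0 + 1) x, List.take (0 + 1) x)) = List.take (0 + 1) := rfl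
  rw [hcomp2]
  have hlenmap : 0 < (xs.map (List.take (0 + 1))).length := by
    simp [List.length_pos_iff, hne]
  have hcombos : pvFnA (xs.map (List.take (0 + 1))) ((0 : Nat) : Int) 0 = pvDiag xs ((0 : Nat) : Int) := by
    rw [pvFnA_eq (xs.map (List.take (0 + 1))) (xs.map (List.take (0 + 1))).length 0 _ rfl hlenmap,
      List.drop_zero, pvDiag_take 0 xs _ (by norm_num) (by norm_num)]
  rw [hcombos]
  have hz : pvDiag xs ((0 : Nat) : Int) = [] := by
    simp [pvDiag, pvProdIdx_nil_of_mem_nil hmem]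
  rw [hz, if_pos (by simp)]

-- ===== VERDICT (by name: the statement is the Claim_ definition above) =====
theorem diagonal_product_spec : Claim_equal_diagonal_product := by
  unfold Claim_equal_diagonal_product
  intro xs _ hpre
  unfold Spec_diagonal_product diagonal_product diagonal_product_alt Pre_diagonal_product at *
  have hS : pvSumLens xs = (((xs.map List.length).sum : Nat) : Int) := pvSumLens_cast xs
  have hinit1 : xs.map (List.drop (0 : Nat)) = xs := by
    rw [show List.drop (0 : Nat) = (fun x : List Int => x) from funext (fun x => List.drop_zero), List.map_id']
  have hinit2 : xs.map (fun _ => ([] : List Int)) = xs.map (List.take (0 : Nat)) := by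
    apply List.map_congr_left; intro x _; simp
  have halt : (PySem.List.pyRange 0 (((xs.map (fun s => (s.length : Int))).sum) - xs.length + 1) 1).flatMap
      (fun diagonal => ((pvProdIdx xs).filter (fun idx => idx.sum == diagonal)).map
        (fun idx => pvZipVals xs idx))
      = (PySem.List.pyRange 0 (pvSumLens xs - xs.length + 1) 1).flatMap (pvDiag xs) := rfl
  rw [halt]
  by_cases hall : ∀ x ∈ xs, x ≠ []
  · have hge := pvSumLens_ge_length hall
    have hle : pvSumLens xs ≤ (((xs.map List.length).sum : Nat) : Int) := le_of_eq hS
    have hloop := pvLoopA_eq xs hpre hall ((xs.map List.length).sum + 2) 0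
      (by omega) (by omega)
    rw [hinit1, ← hinit2] at hloop
    rw [show (((0 : Nat) : Int) = (0 : Int)) from rfl] at hloop
    exact hloop
  · push Not at hall
    obtain ⟨x, hx, hxe⟩ := hall
    have hmem : [] ∈ xs := by rw [← hxe]; exact hx
    have hB : (PySem.List.pyRange 0 (pvSumLens xs - xs.length + 1) 1).flatMap (pvDiag xs) = [] := by
      rw [List.flatMap_eq_nil_iff]
      intro d _
      simp [pvDiag, pvProdIdx_nil_of_mem_nil hmem]
    rw [hB]
    have hbreak := pvLoopA_break_first xs hpre hmem ((xs.map List.length).sum + 1)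
    rw [hinit1, ← hinit2] at hbreak
    rw [show (((0 : Nat) : Int) = (0 : Int)) from rfl] at hbreak
    exact hbreak
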